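-- pv_equiv track=rewrite | github.com/JoshDoesIT/Lemma | src/lemma/services/ansible_discovery.py | _resolve_host_groups
-- ===== SOURCE A (Python) =====
-- def _resolve_host_groups(inventory: dict) -> dict[str, set[str]]:
--     """Build ``host -> {transitively-reachable groups}`` from an inventory dict.
--
--     Walks ``hosts`` lists for direct membership, then unwinds ``children``
--     relationships so a host in ``webservers`` (a child of ``production``)
--     appears in both groups.
--     """
--     # Direct membership: host -> groups it's directly listed in.
--     direct: dict[str, set[str]] = {}
--     # Group hierarchy: child -> parents-that-list-it-as-a-child.
--     parents: dict[str, set[str]] = {}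
--
--     for key, value in inventory.items():
--         if key == "_meta" or not isinstance(value, dict):
--             continue
--         for host in value.get("hosts", []) or []:
--             direct.setdefault(host, set()).add(key)
--         for child in value.get("children", []) or []:
--             parents.setdefault(child, set()).add(key)
--
--     # Walk transitive closure: for each direct group, follow `parents` chains.
--     resolved: dict[str, set[str]] = {}
--     for host, host_groups in direct.items():
--         all_groups: set[str] = set()
--         stack = list(host_groups)
--         while stack:
--             group = stack.pop()
--             if group in all_groups:
--                 continue
--             all_groups.add(group)
--             stack.extend(parents.get(group, set()))
--         # Drop the implicit "all" / "ungrouped" groups — operators almost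
--         # never want to write rules against those.
--         all_groups.discard("all")
--         all_groups.discard("ungrouped")
--         resolved[host] = all_groups
--
--     return resolved
-- ===== SOURCE B (Python) =====
-- def _resolve_host_groups(inventory: dict) -> dict[str, set[str]]:
--     """Memoized variant: compute each group's ancestor closure once, then
--     union the cached closures per host (instead of re-walking the group
--     graph for every host)."""
--     groups = [(k, v) for k, v in inventory.items()
--               if k != "_meta" and isinstance(v, dict)]
--
--     direct: dict[str, set[str]] = {}
--     for key, value in groups:
--         for host in value.get("hosts", []) or []:
--             direct.setdefault(host, set()).add(key)
--
--     parents: dict[str, set[str]] = {}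
--     for key, value in groups:
--         for child in value.get("children", []) or []:
--             parents.setdefault(child, set()).add(key)
--
--     memo: dict[str, set[str]] = {}
--
--     def closure(group: str) -> set[str]:
--         cached = memo.get(group)
--         if cached is not None:
--             return cached
--         acc: set[str] = set()
--         stack = [group]
--         while stack:
--             g = stack.pop()
--             if g not in acc:
--                 acc.add(g)
--                 stack.extend(parents.get(g, set()))
--         memo[group] = acc
--         return acc
--
--     resolved: dict[str, set[str]] = {}
--     for host, host_groups in direct.items():
--         all_groups: set[str] = set()
--         for g in host_groups:
--             all_groups |= closure(g)
--         resolved[host] = all_groups - {"all", "ungrouped"}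
--     return resolved
-- ===== Notes on version B (the rewrite author's own statement) =====
-- stated objective: alternative
-- what changed: B computes each group's transitive ancestor closure once and caches it in a memo dict, then builds every host's group set by unioning the cached per-group closures, instead of A's full graph re-walk for every single host.
import Mathlib
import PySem

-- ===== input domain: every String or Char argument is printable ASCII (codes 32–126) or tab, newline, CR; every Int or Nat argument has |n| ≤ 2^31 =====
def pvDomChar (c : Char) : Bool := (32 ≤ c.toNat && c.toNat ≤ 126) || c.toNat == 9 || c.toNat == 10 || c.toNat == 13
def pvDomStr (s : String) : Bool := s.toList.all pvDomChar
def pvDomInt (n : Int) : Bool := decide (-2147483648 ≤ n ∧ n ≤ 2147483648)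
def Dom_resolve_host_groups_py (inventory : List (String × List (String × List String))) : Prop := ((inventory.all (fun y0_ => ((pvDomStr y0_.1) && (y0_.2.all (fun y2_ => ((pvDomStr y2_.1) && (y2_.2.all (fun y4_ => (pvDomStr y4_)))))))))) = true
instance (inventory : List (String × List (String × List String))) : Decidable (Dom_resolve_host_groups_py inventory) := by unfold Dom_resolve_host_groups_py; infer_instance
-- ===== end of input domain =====

-- B memoizes each group's ancestor closure once and unions the cached closures per
-- host, instead of A's fresh graph walk for every host (objective: alternative).

-- ===== PORT A =====

-- one entry of `for key, value in inventory.items()`: under the type convention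
-- `value` is always a dict, so `isinstance(value, dict)` is always true.
-- `value.get("hosts", []) or []` equals `value.get("hosts", [])` (`xs or []` is `xs`
-- for a list `xs`, since `[] or []` is `[]`).
def pvAStep (acc : PySem.Dict String (PySem.Set String) × PySem.Dict String (PySem.Set String))
    (kv : String × List (String × List String)) :
    PySem.Dict String (PySem.Set String) × PySem.Dict String (PySem.Set String) :=
  if kv.1 == "_meta" then acc
  else
    (((PySem.Dict.mk kv.2).getD "hosts" []).foldl
        (fun d h => d.modify h PySem.Set.empty (fun s => PySem.Set.add s kv.1)) acc.1,
     ((PySem.Dict.mk kv.2).getD "children" []).foldl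
        (fun d c => d.modify c PySem.Set.empty (fun s => PySem.Set.add s kv.1)) acc.2)

-- helper for the termination measure of the closure loops
def pvUnseen (par : PySem.Dict String (PySem.Set String)) (vis : PySem.Set String) : Nat :=
  (par.items.filter (fun p => decide (p.1 ∉ vis))).length

theorem pvUnseen_lt (par : PySem.Dict String (PySem.Set String)) (vis : PySem.Set String)
    (g : String) (hg : g ∉ vis) (hk : g ∈ par.keys) :
    pvUnseen par (vis ++ [g]) < pvUnseen par vis := by
  have hk' : g ∈ par.items.map Prod.fst := by
    simpa [PySem.Dict.keys] using hk
  rcases List.mem_map.mp hk' with ⟨q, hq, hqg⟩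
  rcases List.append_of_mem hq with ⟨l1, l2, hl⟩
  unfold pvUnseen
  rw [hl]
  rw [← List.countP_eq_length_filter, ← List.countP_eq_length_filter]
  rw [List.countP_append, List.countP_append, List.countP_cons, List.countP_cons]
  have h1 := List.countP_mono_left (l := l1)
    (p := fun p : String × PySem.Set String => decide (p.1 ∉ vis ++ [g]))
    (q := fun p : String × PySem.Set String => decide (p.1 ∉ vis))
    (by intro p _ hp; simp only [decide_eq_true_eq, List.mem_append] at *; exact fun h => hp (Or.inl h))
  have h2 := List.countP_mono_left (l := l2)
    (p := fun p : String × PySem.Set String => decide (p.1 ∉ vis ++ [g]))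
    (q := fun p : String × PySem.Set String => decide (p.1 ∉ vis))
    (by intro p _ hp; simp only [decide_eq_true_eq, List.mem_append] at *; exact fun h => hp (Or.inl h))
  have hq1 : (decide (q.1 ∉ vis ++ [g])) = false := by simp [hqg]
  have hq2 : (decide (q.1 ∉ vis)) = true := by simp [hqg, hg]
  rw [hq1, hq2]
  simp only [Bool.false_eq_true, if_false, if_true]
  omega

theorem pvUnseen_eq (par : PySem.Dict String (PySem.Set String)) (vis : PySem.Set String)
    (g : String) (hk : g ∉ par.keys) :
    pvUnseen par (vis ++ [g]) = pvUnseen par vis := by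
  have hk' : g ∉ par.items.map Prod.fst := by
    simpa [PySem.Dict.keys] using hk
  unfold pvUnseen
  congr 1
  apply List.filter_congr
  intro p hp
  have : p.1 ≠ g := by
    intro h
    exact hk' (by simpa [h] using List.mem_map_of_mem (f := Prod.fst) hp)
  simp [List.mem_append, this]

theorem pvGetD_nil (par : PySem.Dict String (PySem.Set String)) (g : String)
    (hk : g ∉ par.keys) : par.getD g PySem.Set.empty = [] := by
  apply PySem.Dict.getD_of_not_contains
  rw [PySem.Dict.contains_eq_decide_mem_keys]
  simp [hk]

theorem pvLoopDec (par : PySem.Dict String (PySem.Set String)) (vis : PySem.Set String)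
    (g : String) (rest : List String) (h : g ∉ vis) :
    Prod.Lex (· < ·) (· < ·)
      (pvUnseen par (PySem.Set.add vis g), ((par.getD g PySem.Set.empty).reverse ++ rest).length)
      (pvUnseen par vis, (g :: rest).length) := by
  rw [PySem.Set.add_of_not_mem h]
  by_cases hk : g ∈ par.keys
  · exact Prod.Lex.left _ _ (pvUnseen_lt par vis g h hk)
  · rw [pvUnseen_eq par vis g hk]
    apply Prod.Lex.right
    rw [pvGetD_nil par g hk]
    simp

-- A's closure while-loop.  The Python stack is modelled top-first: `stack.pop()`
-- takes the head, `stack.extend(xs)` prepends `xs.reverse`.  `parents.get(group,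
-- set())` iterates a set: the traversal order is Python-hash-dependent, but the
-- resulting SET is not; we fix insertion order.
def pvALoop (par : PySem.Dict String (PySem.Set String)) (vis : PySem.Set String) :
    List String → PySem.Set String
  | [] => vis
  | g :: rest =>
    if PySem.Set.contains vis g then pvALoop par vis rest
    else pvALoop par (PySem.Set.add vis g) ((par.getD g PySem.Set.empty).reverse ++ rest)
termination_by stack => (pvUnseen par vis, stack.length)
decreasing_by
  · exact Prod.Lex.right _ (Nat.lt_succ_self _)
  · rename_i h
    simp only [PySem.Set.contains_eq_listContains, List.contains_eq_mem,
      decide_eq_true_eq] at h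
    exact pvLoopDec _ _ _ _ h

-- `for host, host_groups in direct.items()`: `list(host_groups)` is the set in
-- insertion order; popping from the end makes the top-first stack `hg.reverse`.
def resolve_host_groups_py (inventory : List (String × List (String × List String))) :
    List (String × List String) :=
  let dp := inventory.foldl pvAStep (PySem.Dict.empty, PySem.Dict.empty)
  (dp.1.items.foldl (fun r hv =>
      r.insert hv.1
        (PySem.Set.discard
          (PySem.Set.discard (pvALoop dp.2 PySem.Set.empty hv.2.reverse) "all") "ungrouped"))
    PySem.Dict.empty).items

-- ===== PORT B =====

-- `direct` pass of Source B
def pvBDirect (groups : List (String × List (String × List String))) :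
    PySem.Dict String (PySem.Set String) :=
  groups.foldl (fun d kv =>
    ((PySem.Dict.mk kv.2).getD "hosts" []).foldl
      (fun d h => d.modify h PySem.Set.empty (fun s => PySem.Set.add s kv.1)) d)
    PySem.Dict.empty

-- `parents` pass of Source B
def pvBParents (groups : List (String × List (String × List String))) :
    PySem.Dict String (PySem.Set String) :=
  groups.foldl (fun d kv =>
    ((PySem.Dict.mk kv.2).getD "children" []).foldl
      (fun d c => d.modify c PySem.Set.empty (fun s => PySem.Set.add s kv.1)) d)
    PySem.Dict.empty

-- the while-loop inside Source B's `closure` (same stack convention as pvALoop)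
def pvBLoop (par : PySem.Dict String (PySem.Set String)) (acc : PySem.Set String) :
    List String → PySem.Set String
  | [] => acc
  | g :: rest =>
    if PySem.Set.contains acc g then pvBLoop par acc rest
    else pvBLoop par (PySem.Set.add acc g) ((par.getD g PySem.Set.empty).reverse ++ rest)
termination_by stack => (pvUnseen par acc, stack.length)
decreasing_by
  · exact Prod.Lex.right _ (Nat.lt_succ_self _)
  · rename_i h
    simp only [PySem.Set.contains_eq_listContains, List.contains_eq_mem,
      decide_eq_true_eq] at h
    exact pvLoopDec _ _ _ _ h

-- Source B's `closure(group)`: the memo dict is threaded through explicitly.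
def pvBClosure (par : PySem.Dict String (PySem.Set String))
    (memo : PySem.Dict String (PySem.Set String)) (g : String) :
    PySem.Set String × PySem.Dict String (PySem.Set String) :=
  match memo.get? g with
  | some c => (c, memo)
  | none =>
    let acc := pvBLoop par PySem.Set.empty [g]
    (acc, memo.insert g acc)

-- `for g in host_groups` iterates a set in unspecified hash order; the union it
-- builds is order-independent as a set; we iterate in reverse insertion order.
def resolve_host_groups_py_alt (inventory : List (String × List (String × List String))) :
    List (String × List String) :=
  let groups := inventory.filter (fun kv => kv.1 != "_meta")
  let parents := pvBParents groups
  ((pvBDirect groups).items.foldl (fun rm hv =>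
      let am := hv.2.reverse.foldl (fun am g =>
          let cm := pvBClosure parents am.2 g
          (PySem.Set.union am.1 cm.1, cm.2)) (PySem.Set.empty, rm.2)
      (rm.1.insert hv.1 (PySem.Set.diff am.1 ["all", "ungrouped"]), am.2))
    (PySem.Dict.empty, PySem.Dict.empty)).1.items

-- ===== PRECONDITION & SPEC =====
def Spec_resolve_host_groups_py (inventory : List (String × List (String × List String))) (out : List (String × List String)) : Prop := out = resolve_host_groups_py_alt inventory
instance (inventory : List (String × List (String × List String))) (out : List (String × List String)) : Decidable (Spec_resolve_host_groups_py inventory out) := by unfold Spec_resolve_host_groups_py; infer_instance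

-- ===== CLAIM (what is proved, stated in full; the proofs are below) =====
def Claim_equal_resolve_host_groups_py : Prop := ∀ (inventory : List (String × List (String × List String))), Dom_resolve_host_groups_py inventory → Spec_resolve_host_groups_py inventory (resolve_host_groups_py inventory)

-- ===== LEMMAS AND PROOFS =====

-- unfolding equations for the two while-loops
theorem pvALoop_nil (par : PySem.Dict String (PySem.Set String)) (vis : PySem.Set String) :
    pvALoop par vis [] = vis := by rw [pvALoop.eq_def]

theorem pvALoop_cons (par : PySem.Dict String (PySem.Set String)) (vis : PySem.Set String)
    (g : String) (rest : List String) :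
    pvALoop par vis (g :: rest) =
      if PySem.Set.contains vis g then pvALoop par vis rest
      else pvALoop par (PySem.Set.add vis g) ((par.getD g PySem.Set.empty).reverse ++ rest) := by
  rw [pvALoop.eq_def]

-- the two while-loops are the same transliteration
theorem pvBLoop_eq_pvALoop (par : PySem.Dict String (PySem.Set String)) :
    ∀ (s : List String) (acc : PySem.Set String), pvBLoop par acc s = pvALoop par acc s := by
  intro s acc
  fun_induction pvBLoop par acc s with
  | case1 acc => rw [pvALoop_nil]
  | case2 acc g rest h ih => rw [pvALoop_cons]; simp only [h, if_true]; exact ih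
  | case3 acc g rest h ih =>
    rw [pvALoop_cons]
    simp only [h, Bool.false_eq_true, if_false]
    exact ih

-- the worklist loop processes a deferred suffix afterwards
theorem pvALoop_append (par : PySem.Dict String (PySem.Set String)) :
    ∀ (s1 : List String) (v : PySem.Set String) (s2 : List String),
      pvALoop par v (s1 ++ s2) = pvALoop par (pvALoop par v s1) s2 := by
  intro s1 v s2
  fun_induction pvALoop par v s1 generalizing s2 with
  | case1 v => rfl
  | case2 v g rest h ih =>
    rw [List.cons_append, pvALoop_cons]
    simp only [h, if_true]
    exact ih _
  | case3 v g rest h ih =>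
    rw [List.cons_append, pvALoop_cons]
    simp only [h, Bool.false_eq_true, if_false]
    rw [← List.append_assoc]
    exact ih _

-- stack entries that are already visited are dropped
theorem pvALoop_skip (par : PySem.Dict String (PySem.Set String)) :
    ∀ (s1 : List String) (v : PySem.Set String) (s2 : List String),
      (∀ x ∈ s1, x ∈ v) → pvALoop par v (s1 ++ s2) = pvALoop par v s2 := by
  intro s1
  induction s1 with
  | nil => intro v s2 _; rw [List.nil_append]
  | cons x t ih =>
    intro v s2 h
    rw [List.cons_append, pvALoop_cons]
    have hx : PySem.Set.contains v x = true := by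
      simp only [PySem.Set.contains_eq_listContains, List.contains_eq_mem, decide_eq_true_eq]
      exact h x List.mem_cons_self
    simp only [hx, if_true]
    exact ih v s2 (fun y hy => h y (List.mem_cons_of_mem _ hy))

-- "v is closed under the parent relation"
def pvClosed (par : PySem.Dict String (PySem.Set String)) (v : List String) : Prop :=
  ∀ g ∈ v, ∀ p ∈ par.getD g PySem.Set.empty, p ∈ v

theorem pvClosed_empty (par : PySem.Dict String (PySem.Set String)) : pvClosed par [] := by
  intro g hg; cases hg

theorem pvALoop_closed (par : PySem.Dict String (PySem.Set String)) :
    ∀ (s : List String) (v : PySem.Set String),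
      (∀ g ∈ v, ∀ p ∈ par.getD g PySem.Set.empty, p ∈ v ∨ p ∈ s) →
      pvClosed par (pvALoop par v s) := by
  intro s v
  fun_induction pvALoop par v s with
  | case1 v =>
    intro h g hg p hp
    rcases h g hg p hp with h' | h'
    · exact h'
    · cases h'
  | case2 v g rest hc ih =>
    intro h
    apply ih
    intro x hx p hp
    rcases h x hx p hp with h' | h'
    · exact Or.inl h'
    · rcases List.mem_cons.mp h' with h'' | h''
      · subst h''
        refine Or.inl ?_
        simpa only [PySem.Set.contains_eq_listContains, List.contains_eq_mem,
          decide_eq_true_eq] using hc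
      · exact Or.inr h''
  | case3 v g rest hc ih =>
    intro h
    have hg : g ∉ v := by
      simpa only [PySem.Set.contains_eq_listContains, List.contains_eq_mem,
        Bool.not_eq_true, decide_eq_false_iff_not] using hc
    rw [PySem.Set.add_of_not_mem hg] at ih ⊢
    apply ih
    intro x hx p hp
    rcases List.mem_append.mp hx with hx' | hx'
    · rcases h x hx' p hp with h' | h'
      · exact Or.inl (List.mem_append.mpr (Or.inl h'))
      · rcases List.mem_cons.mp h' with h'' | h''
        · subst h''
          exact Or.inl (List.mem_append.mpr (Or.inr List.mem_cons_self))
        · exact Or.inr (List.mem_append.mpr (Or.inr h''))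
    · have hxg : x = g := by simpa using hx'
      subst hxg
      exact Or.inr (List.mem_append.mpr (Or.inl (List.mem_reverse.mpr hp)))

theorem pvALoop_nodup (par : PySem.Dict String (PySem.Set String)) :
    ∀ (s : List String) (v : PySem.Set String), v.Nodup → (pvALoop par v s).Nodup := by
  intro s v
  fun_induction pvALoop par v s with
  | case1 v => exact id
  | case2 v g rest hc ih => exact ih
  | case3 v g rest hc ih =>
    intro h
    have hg : g ∉ v := by
      simpa only [PySem.Set.contains_eq_listContains, List.contains_eq_mem,
        Bool.not_eq_true, decide_eq_false_iff_not] using hc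
    rw [PySem.Set.add_of_not_mem hg] at ih ⊢
    apply ih
    rw [List.nodup_append]
    refine ⟨h, List.nodup_singleton _, ?_⟩
    intro a ha b hb
    have hb' : b = g := by simpa using hb
    subst hb'
    intro e
    exact hg (e ▸ ha)

-- KEY LEMMA: running the walk with a parent-closed pre-visited set v is the
-- standalone walk with v's members filtered away
theorem pvALoop_absorb (par : PySem.Dict String (PySem.Set String))
    (v : List String) (hv : pvClosed par v) :
    ∀ (s : List String) (w : PySem.Set String),
      pvALoop par (v ++ w.filter (fun x => decide (x ∉ v))) s
        = v ++ (pvALoop par w s).filter (fun x => decide (x ∉ v)) := by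
  intro s w
  fun_induction pvALoop par w s with
  | case1 w => rw [pvALoop_nil]
  | case2 w g rest hc ih =>
    have hgw : g ∈ w := by
      simpa only [PySem.Set.contains_eq_listContains, List.contains_eq_mem,
        decide_eq_true_eq] using hc
    rw [pvALoop_cons]
    have hV : PySem.Set.contains (v ++ w.filter (fun x => decide (x ∉ v))) g = true := by
      simp only [PySem.Set.contains_eq_listContains, List.contains_eq_mem, decide_eq_true_eq,
        List.mem_append, List.mem_filter]
      by_cases hgv : g ∈ v
      · exact Or.inl hgv
      · exact Or.inr ⟨hgw, by simpa using hgv⟩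
    simp only [hV, if_true]
    exact ih
  | case3 w g rest hc ih =>
    have hgw : g ∉ w := by
      simpa only [PySem.Set.contains_eq_listContains, List.contains_eq_mem,
        Bool.not_eq_true, decide_eq_false_iff_not] using hc
    rw [pvALoop_cons]
    rw [PySem.Set.add_of_not_mem hgw] at ih ⊢
    by_cases hgv : g ∈ v
    · -- g already in the closed set v: the combined walk skips it, the standalone
      -- walk visits it but the filter drops it and its (already-in-v) parents
      have hfil : (w ++ [g]).filter (fun x => decide (x ∉ v)) = w.filter (fun x => decide (x ∉ v)) := by
        simp [List.filter_append, hgv]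
      rw [hfil] at ih
      have hV : PySem.Set.contains (v ++ w.filter (fun x => decide (x ∉ v))) g = true := by
        simp only [PySem.Set.contains_eq_listContains, List.contains_eq_mem,
          decide_eq_true_eq, List.mem_append]
        exact Or.inl hgv
      simp only [hV, if_true]
      rw [← ih]
      refine (pvALoop_skip par ((par.getD g PySem.Set.empty).reverse) _ rest ?_).symm
      intro x hx
      exact List.mem_append.mpr (Or.inl (hv g hgv x (List.mem_reverse.mp hx)))
    · have hfil : (w ++ [g]).filter (fun x => decide (x ∉ v))
          = w.filter (fun x => decide (x ∉ v)) ++ [g] := by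
        simp [List.filter_append, hgv]
      rw [hfil] at ih
      have hV : PySem.Set.contains (v ++ w.filter (fun x => decide (x ∉ v))) g = false := by
        simp only [PySem.Set.contains_eq_listContains, List.contains_eq_mem,
          List.mem_append, List.mem_filter]
        simp [hgv, hgw]
      simp only [hV, Bool.false_eq_true, if_false]
      have hgV : g ∉ v ++ w.filter (fun x => decide (x ∉ v)) := by
        simp only [List.mem_append, List.mem_filter]
        simp [hgv, hgw]
      rw [PySem.Set.add_of_not_mem hgV, List.append_assoc]
      exact ih

theorem pvALoop_of_closed (par : PySem.Dict String (PySem.Set String))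
    (v : List String) (hv : pvClosed par v) (s : List String) :
    pvALoop par v s = v ++ (pvALoop par PySem.Set.empty s).filter (fun x => decide (x ∉ v)) := by
  have h := pvALoop_absorb par v hv s PySem.Set.empty
  rw [show List.filter (fun x => decide (x ∉ v)) (PySem.Set.empty : PySem.Set String) = [] from rfl,
    List.append_nil] at h
  exact h

-- s | t  appends t's new elements (t duplicate-free)
theorem pvUnion_eq_append (a c : List String) (hc : c.Nodup) :
    PySem.Set.union a c = a ++ c.filter (fun x => decide (x ∉ a)) := by
  show PySem.Set.update a c = _
  rw [PySem.Set.update_eq_append_filter, PySem.Set.ofList_eq_self_of_nodup c hc]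
  congr 1
  apply List.filter_congr
  intro x _
  simp [PySem.Set.contains_eq_listContains]

-- the two discards are the set difference with {"all", "ungrouped"}
theorem pvDiscard2 (s : List String) :
    PySem.Set.discard (PySem.Set.discard s "all") "ungrouped"
      = PySem.Set.diff s ["all", "ungrouped"] := by
  show List.filter _ (List.filter _ s) = List.filter _ s
  rw [List.filter_filter]
  apply List.filter_congr
  intro x _
  simp only [PySem.Set.contains_eq_listContains, List.contains_eq_mem]
  cases hx1 : x == "all" <;> cases hx2 : x == "ungrouped" <;>
    simp_all [beq_iff_eq]

-- per-host: unioning the standalone closures equals A's single walk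
theorem pvFoldUnion (par : PySem.Dict String (PySem.Set String)) :
    ∀ (l : List String) (a : List String), pvClosed par a → a.Nodup →
      l.foldl (fun acc g => PySem.Set.union acc (pvALoop par PySem.Set.empty [g])) a
        = pvALoop par a l := by
  intro l
  induction l with
  | nil => intro a _ _; rw [pvALoop_nil]; rfl
  | cons g t ih =>
    intro a ha hnd
    have hclo : pvALoop par a [g] = a ++ (pvALoop par PySem.Set.empty [g]).filter (fun x => decide (x ∉ a)) :=
      pvALoop_of_closed par a ha [g]
    have hnodup : (pvALoop par PySem.Set.empty [g]).Nodup := pvALoop_nodup par [g] _ List.nodup_nil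
    rw [List.foldl_cons, pvUnion_eq_append a _ hnodup, ← hclo]
    have hclosed : pvClosed par (pvALoop par a [g]) := by
      apply pvALoop_closed
      intro x hx p hp
      exact Or.inl (ha x hx p hp)
    have hnd' : (pvALoop par a [g]).Nodup := pvALoop_nodup par [g] a hnd
    rw [ih _ hclosed hnd']
    rw [show (g :: t) = [g] ++ t from rfl, pvALoop_append]

-- memo dict soundness
def pvMinv (par : PySem.Dict String (PySem.Set String))
    (memo : PySem.Dict String (PySem.Set String)) : Prop :=
  ∀ g c, memo.get? g = some c → c = pvBLoop par PySem.Set.empty [g]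

theorem pvMinv_empty (par : PySem.Dict String (PySem.Set String)) :
    pvMinv par PySem.Dict.empty := by
  intro g c h
  rw [PySem.Dict.get?_empty] at h
  cases h

theorem pvBClosure_fst (par memo : PySem.Dict String (PySem.Set String)) (g : String)
    (h : pvMinv par memo) : (pvBClosure par memo g).1 = pvBLoop par PySem.Set.empty [g] := by
  unfold pvBClosure
  cases hm : memo.get? g with
  | none => rfl
  | some c => exact h g c hm

theorem pvBClosure_minv (par memo : PySem.Dict String (PySem.Set String)) (g : String)
    (h : pvMinv par memo) : pvMinv par (pvBClosure par memo g).2 := by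
  unfold pvBClosure
  cases hm : memo.get? g with
  | none =>
    intro g' c' h'
    rw [PySem.Dict.get?_insert] at h'
    split at h'
    · rename_i heq
      subst heq
      cases h'
      rfl
    · exact h g' c' h'
  | some c => exact h

-- the memoized union fold computes the plain union fold
theorem pvInner (par : PySem.Dict String (PySem.Set String)) :
    ∀ (l : List String) (a : PySem.Set String) (memo : PySem.Dict String (PySem.Set String)),
      pvMinv par memo →
      (l.foldl (fun am g =>
          (PySem.Set.union am.1 (pvBClosure par am.2 g).1, (pvBClosure par am.2 g).2)) (a, memo)).1
        = l.foldl (fun acc g => PySem.Set.union acc (pvBLoop par PySem.Set.empty [g])) a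
      ∧ pvMinv par (l.foldl (fun am g =>
          (PySem.Set.union am.1 (pvBClosure par am.2 g).1, (pvBClosure par am.2 g).2)) (a, memo)).2 := by
  intro l
  induction l with
  | nil => intro a memo h; exact ⟨rfl, h⟩
  | cons g t ih =>
    intro a memo h
    simp only [List.foldl_cons]
    rw [pvBClosure_fst par memo g h]
    exact ih _ _ (pvBClosure_minv par memo g h)

-- the resolved-dict folds agree (B threads the memo through)
theorem pvOuter (par : PySem.Dict String (PySem.Set String)) :
    ∀ (items : List (String × PySem.Set String)) (r memo : PySem.Dict String (PySem.Set String)),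
      pvMinv par memo →
      (items.foldl (fun rm hv =>
          (rm.1.insert hv.1 (PySem.Set.diff
              (hv.2.reverse.foldl (fun am g =>
                (PySem.Set.union am.1 (pvBClosure par am.2 g).1, (pvBClosure par am.2 g).2))
                (PySem.Set.empty, rm.2)).1 ["all", "ungrouped"]),
           (hv.2.reverse.foldl (fun am g =>
                (PySem.Set.union am.1 (pvBClosure par am.2 g).1, (pvBClosure par am.2 g).2))
                (PySem.Set.empty, rm.2)).2)) (r, memo)).1
        = items.foldl (fun r hv =>
            r.insert hv.1
              (PySem.Set.discard
                (PySem.Set.discard (pvALoop par PySem.Set.empty hv.2.reverse) "all") "ungrouped")) r := by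
  intro items
  induction items with
  | nil => intro r memo _; rfl
  | cons hv t ih =>
    intro r memo h
    simp only [List.foldl_cons]
    obtain ⟨h1, h2⟩ := pvInner par hv.2.reverse PySem.Set.empty memo h
    rw [pvDiscard2]
    have hval : (hv.2.reverse.foldl (fun am g =>
        (PySem.Set.union am.1 (pvBClosure par am.2 g).1, (pvBClosure par am.2 g).2))
        (PySem.Set.empty, memo)).1
        = pvALoop par PySem.Set.empty hv.2.reverse := by
      rw [h1]
      have : ∀ (acc0 : PySem.Set String) (xs : List String),
          xs.foldl (fun acc g => PySem.Set.union acc (pvBLoop par PySem.Set.empty [g])) acc0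
            = xs.foldl (fun acc g => PySem.Set.union acc (pvALoop par PySem.Set.empty [g])) acc0 := by
        intro acc0 xs
        simp only [pvBLoop_eq_pvALoop]
      rw [this]
      exact pvFoldUnion par hv.2.reverse PySem.Set.empty (pvClosed_empty par) List.nodup_nil
    rw [hval]
    exact ih _ _ h2

-- build phase: A's single pass equals B's filter + two passes
theorem pvBuild :
    ∀ (inv : List (String × List (String × List String)))
      (d p : PySem.Dict String (PySem.Set String)),
      inv.foldl pvAStep (d, p)
        = ((inv.filter (fun kv => kv.1 != "_meta")).foldl (fun d kv =>
              ((PySem.Dict.mk kv.2).getD "hosts" []).foldl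
                (fun d h => d.modify h PySem.Set.empty (fun s => PySem.Set.add s kv.1)) d) d,
           (inv.filter (fun kv => kv.1 != "_meta")).foldl (fun d kv =>
              ((PySem.Dict.mk kv.2).getD "children" []).foldl
                (fun d c => d.modify c PySem.Set.empty (fun s => PySem.Set.add s kv.1)) d) p) := by
  intro inv
  induction inv with
  | nil => intro d p; rfl
  | cons kv t ih =>
    intro d p
    by_cases hm : kv.1 == "_meta"
    · simp only [List.foldl_cons, List.filter_cons, pvAStep, hm, if_true, bne,
        Bool.not_true, Bool.false_eq_true, if_false]
      exact ih d p
    · simp only [List.foldl_cons, List.filter_cons, pvAStep, hm, Bool.false_eq_true, if_false,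
        bne, Bool.not_false, if_true]
      exact ih _ _

theorem pvBuild' (inv : List (String × List (String × List String))) :
    inv.foldl pvAStep (PySem.Dict.empty, PySem.Dict.empty)
      = (pvBDirect (inv.filter (fun kv => kv.1 != "_meta")),
         pvBParents (inv.filter (fun kv => kv.1 != "_meta"))) :=
  pvBuild inv PySem.Dict.empty PySem.Dict.empty

-- ===== VERDICT (by name: the statement is the Claim_ definition above) =====
theorem resolve_host_groups_py_spec : Claim_equal_resolve_host_groups_py := by
  intro inventory _
  unfold Spec_resolve_host_groups_py resolve_host_groups_py resolve_host_groups_py_alt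
  rw [pvBuild' inventory]
  simp only
  rw [pvOuter (pvBParents (inventory.filter (fun kv => kv.1 != "_meta")))
        ((pvBDirect (inventory.filter (fun kv => kv.1 != "_meta"))).items)
        PySem.Dict.empty PySem.Dict.empty (pvMinv_empty _)]
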